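-- pv_equiv track=rewrite | github.com/nhdewitt/codewars-kata | 6 kyu/lets_recycle.py | recycle
-- ===== SOURCE A (Python) =====
-- def recycle(a):
--     paper, glass, organic, plastic = [], [], [], []                     # outputs for each material
--     recycling_bins = {                                                  # map each material from dictionary to the previous lists
--         "paper": paper,
--         "glass": glass,
--         "organic": organic,
--         "plastic": plastic
--     }
--
--     for el in a:
--         i = el["type"]                                                  # type = item to be added
--         for m in (el.get("material"), el.get("secondMaterial")):        # add to the first list (material) and, if present, the second list
--             if m in recycling_bins:
--                 recycling_bins[m].append(i)
--
--     return (paper, glass, organic, plastic)                             # return as tuple of lists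
-- ===== SOURCE B (Python) =====
-- def recycle(a):
--     items = [(el["type"], (el.get("material"), el.get("secondMaterial"))) for el in a]
--     def bin(mat):
--         return [t for t, ms in items for m in ms if m == mat]
--     return (bin("paper"), bin("glass"), bin("organic"), bin("plastic"))
-- ===== Notes on version B (the rewrite author's own statement) =====
-- stated objective: simpler
-- what changed: Replaces the dict-of-mutable-bins dispatch loop with one pass extracting (type, materials) followed by four independent filtering comprehensions, one per material.
import Mathlib
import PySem

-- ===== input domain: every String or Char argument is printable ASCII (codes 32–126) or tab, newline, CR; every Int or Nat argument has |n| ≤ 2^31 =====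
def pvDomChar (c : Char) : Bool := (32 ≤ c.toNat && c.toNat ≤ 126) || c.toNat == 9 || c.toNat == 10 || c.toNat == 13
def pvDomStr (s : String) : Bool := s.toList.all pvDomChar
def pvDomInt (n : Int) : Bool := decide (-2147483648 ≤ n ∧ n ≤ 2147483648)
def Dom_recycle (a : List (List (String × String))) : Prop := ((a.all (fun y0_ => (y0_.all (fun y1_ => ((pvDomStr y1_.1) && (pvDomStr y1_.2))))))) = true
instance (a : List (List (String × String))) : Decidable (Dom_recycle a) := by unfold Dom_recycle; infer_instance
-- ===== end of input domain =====

-- B replaces A's dict-of-mutable-bins dispatch loop with one extraction pass plus four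
-- independent per-material filtering passes (objective: simpler).

-- ===== PORT A =====
-- el.get(k) / el[k]: first-match lookup in the association list (Python dict lookup)
def dget (el : List (String × String)) (k : String) : Option String := el.lookup k

-- one step of the inner 'for m in (…, …): if m in recycling_bins: recycling_bins[m].append(i)'
def binStep (i : String) (st : List String × List String × List String × List String)
    (m : Option String) : List String × List String × List String × List String :=
  match st with
  | (p, g, o, pl) =>
    if m = some "paper" then (p ++ [i], g, o, pl)
    else if m = some "glass" then (p, g ++ [i], o, pl)
    else if m = some "organic" then (p, g, o ++ [i], pl)
    else if m = some "plastic" then (p, g, o, pl ++ [i])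
    else (p, g, o, pl)

-- the outer 'for el in a' loop
def recycleLoop (a : List (List (String × String)))
    (st : List String × List String × List String × List String) :
    List String × List String × List String × List String :=
  match a with
  | [] => st
  | el :: rest =>
    -- i = el["type"]: Pre_recycle guarantees the key is present, so getD is exact there
    let i := (dget el "type").getD ""
    recycleLoop rest (([dget el "material", dget el "secondMaterial"]).foldl (binStep i) st)

def recycle (a : List (List (String × String))) : List String × List String × List String × List String :=
  recycleLoop a ([], [], [], [])

-- ===== PORT B =====
-- [t for t, ms in items for m in ms if m == mat]
def binB (items : List (String × Option String × Option String)) (mat : String) : List String :=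
  items.flatMap (fun tm => (([tm.2.1, tm.2.2]).filter (· = some mat)).map (fun _ => tm.1))

def recycle_alt (a : List (List (String × String))) : List String × List String × List String × List String :=
  let items := a.map (fun el =>
    ((dget el "type").getD "", dget el "material", dget el "secondMaterial"))
  (binB items "paper", binB items "glass", binB items "organic", binB items "plastic")

-- ===== PRECONDITION & SPEC =====
-- A raises KeyError on any element dict lacking the key "type"; Pre_ admits exactly the inputs where el["type"] succeeds.
def Pre_recycle (a : List (List (String × String))) : Prop :=
  ∀ el ∈ a, (dget el "type").isSome = true
instance (a : List (List (String × String))) : Decidable (Pre_recycle a) := by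
  unfold Pre_recycle; infer_instance

def pvWitness_recycle : (List (List (String × String))) :=
  [[("type", "bottle"), ("material", "glass")], [("type", "box"), ("material", "paper"), ("secondMaterial", "plastic")]]

def Spec_recycle (a : List (List (String × String))) (out : List String × List String × List String × List String) : Prop := out = recycle_alt a
instance (a : List (List (String × String))) (out : List String × List String × List String × List String) : Decidable (Spec_recycle a out) := by unfold Spec_recycle; infer_instance

-- ===== CLAIM (what is proved, stated in full; the proofs are below) =====
def Claim_equal_recycle : Prop := ∀ (a : List (List (String × String))), Dom_recycle a → Pre_recycle a → Spec_recycle a (recycle a)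

-- ===== LEMMAS AND PROOFS =====

-- one binStep appends (if m = some mat then [i] else []) to each bin
def sel (m : Option String) (mat : String) (i : String) : List String :=
  if m = some mat then [i] else []

lemma binStep_eq (i : String) (p g o pl : List String) (m : Option String) :
    binStep i (p, g, o, pl) m =
      (p ++ sel m "paper" i, g ++ sel m "glass" i, o ++ sel m "organic" i, pl ++ sel m "plastic" i) := by
  unfold binStep sel
  split_ifs <;> simp_all

lemma binB_cons (t : String) (m1 m2 : Option String)
    (items : List (String × Option String × Option String)) (mat : String) :
    binB ((t, m1, m2) :: items) mat = sel m1 mat t ++ sel m2 mat t ++ binB items mat := by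
  unfold binB sel
  simp only [List.flatMap_cons, List.filter_cons, List.filter_nil]
  split_ifs <;> simp_all

-- the loop of A, started from an arbitrary accumulator, appends exactly B's four filtered lists
lemma recycleLoop_eq (a : List (List (String × String)))
    (p g o pl : List String) :
    recycleLoop a (p, g, o, pl) =
      (p ++ binB (a.map (fun el => ((dget el "type").getD "", dget el "material", dget el "secondMaterial"))) "paper",
       g ++ binB (a.map (fun el => ((dget el "type").getD "", dget el "material", dget el "secondMaterial"))) "glass",
       o ++ binB (a.map (fun el => ((dget el "type").getD "", dget el "material", dget el "secondMaterial"))) "organic",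
       pl ++ binB (a.map (fun el => ((dget el "type").getD "", dget el "material", dget el "secondMaterial"))) "plastic") := by
  induction a generalizing p g o pl with
  | nil => simp [recycleLoop, binB]
  | cons el rest ih =>
    simp only [recycleLoop, List.map_cons, List.foldl_cons, List.foldl_nil,
      binStep_eq, ih, binB_cons, List.append_assoc]

-- ===== VERDICT (by name: the statement is the Claim_ definition above) =====
theorem recycle_spec : Claim_equal_recycle := by
  intro a _ _
  unfold Spec_recycle recycle recycle_alt
  rw [recycleLoop_eq]
  simp
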